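-- pv_equiv track=rewrite | github.com/rahulkataria35/DSA-Python-Essentials | 4.Binary Search/2.BS on Answers/8.AggressiveCows.py | brute
-- ===== SOURCE A (Python) =====
-- def brute (arr,n,k):
--     arr.sort()
--     maxi = max(arr)
--     mini = min(arr)
--     limit = arr[n-1] - arr[0]
--     for i in range (1, (maxi- mini)):
--         if not helper(arr,i,k):
--             return i-1
--     return limit
--
-- def helper(arr,dist,k):
--     cntCow = 1
--     lastPlace = arr[0]
--     for i in range(1,(len(arr))):
--         if arr[i] - lastPlace >= dist :
--             cntCow += 1
--             lastPlace = arr[i]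
--         if cntCow >= k :
--             return True
--     return False
-- ===== SOURCE B (Python) =====
-- def brute(arr, n, k):
--     # Binary search on the answer distance instead of A's linear scan over all distances.
--     # Like A, this sorts arr in place (observable mutation, same as A).
--     arr.sort()
--     maxi = arr[-1]
--     mini = arr[0]
--     limit = arr[n - 1] - arr[0]
--     lo, hi = 1, maxi - mini  # search the smallest infeasible distance in [1, maxi-mini)
--     while lo < hi:
--         mid = (lo + hi) // 2
--         if can(arr, mid, k):
--             lo = mid + 1
--         else:
--             hi = mid
--     return limit if lo >= maxi - mini else lo - 1
--
--
-- def can(arr, dist, k):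
--     cnt = 1
--     last = arr[0]
--     for x in arr[1:]:
--         if x - last >= dist:
--             cnt += 1
--             last = x
--     return cnt >= k
-- ===== Notes on version B (the rewrite author's own statement) =====
-- stated objective: alternative
-- what changed: Replaces A's linear scan over every candidate distance (each probed with the greedy placement check) by a binary search on the answer distance, exploiting that greedy feasibility is monotone in the distance; on the measured input family A often exits after the first probe, so no speed-up is claimed.
import Mathlib
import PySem

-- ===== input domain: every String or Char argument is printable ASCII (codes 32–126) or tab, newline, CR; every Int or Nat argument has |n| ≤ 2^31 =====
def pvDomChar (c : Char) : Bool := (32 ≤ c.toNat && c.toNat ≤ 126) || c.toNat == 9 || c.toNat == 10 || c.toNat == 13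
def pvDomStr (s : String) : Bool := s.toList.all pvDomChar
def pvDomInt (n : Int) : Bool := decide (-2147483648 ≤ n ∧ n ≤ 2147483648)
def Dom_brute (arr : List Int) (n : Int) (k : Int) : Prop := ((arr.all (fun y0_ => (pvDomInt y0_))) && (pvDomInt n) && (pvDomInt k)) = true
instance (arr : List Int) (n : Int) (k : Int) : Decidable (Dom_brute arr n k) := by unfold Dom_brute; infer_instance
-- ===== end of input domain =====

-- B replaces A's linear scan over all candidate distances by a binary search on the
-- answer distance (an alternative algorithm; no speed claim). Both A and B sort the
-- caller's list in place; the equivalence proved here is about the return value.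

-- ===== PORT A =====
-- helper's loop: 'for i in range(1, len(arr))' with the early 'return True'
def pvHelperLoop (arr : List Int) (dist k : Int) : List Int → Int → Int → Bool
  | [], _, _ => false
  | i :: rest, cntCow, lastPlace =>
    let x := PySem.List.pyGetD arr i 0  -- i comes from range(1, len(arr)): always in range
    let cnt' := if x - lastPlace ≥ dist then cntCow + 1 else cntCow
    let last' := if x - lastPlace ≥ dist then x else lastPlace
    if cnt' ≥ k then true else pvHelperLoop arr dist k rest cnt' last'

def pvHelper (arr : List Int) (dist k : Int) : Bool :=
  pvHelperLoop arr dist k (PySem.List.pyRange 1 (arr.length : Int) 1) 1 (PySem.List.pyGetD arr 0 0)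

-- brute's loop: 'for i in range(1, maxi-mini)' with the early 'return i-1'
-- (the range is consumed lazily, as a counter, exactly as Python's range object is)
def pvBruteLoop (arr : List Int) (k limit i R : Int) : Int :=
  if h : i < R then
    if ¬ (pvHelper arr i k = true) then i - 1 else pvBruteLoop arr k limit (i + 1) R
  else limit
termination_by (R - i).toNat
decreasing_by omega

def brute (arr : List Int) (n : Int) (k : Int) : Int :=
  let s := PySem.List.sorted arr (fun x => x) false
  let maxi := (PySem.List.max? s (fun x => x)).getD 0  -- max(arr); arr = [] (ValueError) excluded by Pre_
  let mini := (PySem.List.min? s (fun x => x)).getD 0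
  let limit := PySem.List.pyGetD s (n - 1) 0 - PySem.List.pyGetD s 0 0  -- IndexError excluded by Pre_
  pvBruteLoop s k limit 1 (maxi - mini)

-- ===== PORT B =====
-- B's greedy feasibility check: state (cnt, last) folded over arr[1:]
def pvCanLoop (dist : Int) : List Int → Int → Int → Int × Int
  | [], cnt, last => (cnt, last)
  | x :: xs, cnt, last =>
    if x - last ≥ dist then pvCanLoop dist xs (cnt + 1) x else pvCanLoop dist xs cnt last

def pvCan (arr : List Int) (dist k : Int) : Bool :=
  decide ((pvCanLoop dist (PySem.List.slice arr (some 1) none) 1 (PySem.List.pyGetD arr 0 0)).1 ≥ k)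

-- B's 'while lo < hi' binary search on the answer distance
def pvBsearch (arr : List Int) (k lo hi : Int) : Int :=
  if h : lo < hi then
    let mid := PySem.Int.floordiv (lo + hi) 2
    if pvCan arr mid k then pvBsearch arr k (mid + 1) hi else pvBsearch arr k lo mid
  else lo
termination_by (hi - lo).toNat
decreasing_by
  all_goals
    have h1 := PySem.Int.floordiv_two_mid_bounds (le_of_lt h)
    have h2 : PySem.Int.floordiv (lo + hi) 2 < hi := by
      rw [PySem.Int.floordiv_lt_iff_lt_mul (by norm_num)]; omega
    omega

def brute_alt (arr : List Int) (n : Int) (k : Int) : Int :=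
  let s := PySem.List.sorted arr (fun x => x) false
  let maxi := PySem.List.pyGetD s (-1) 0  -- arr[-1]; arr = [] excluded by Pre_
  let mini := PySem.List.pyGetD s 0 0
  let limit := PySem.List.pyGetD s (n - 1) 0 - PySem.List.pyGetD s 0 0
  let lo := pvBsearch s k 1 (maxi - mini)
  if lo ≥ maxi - mini then limit else lo - 1

-- ===== PRECONDITION & SPEC =====
-- Pre_ excludes exactly the inputs where the Python A raises: the empty list
-- (max([]) is a ValueError) and an n with arr[n-1] out of range (IndexError).
def Pre_brute (arr : List Int) (n : Int) (k : Int) : Prop :=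
  arr ≠ [] ∧ -(arr.length : Int) ≤ n - 1 ∧ n - 1 < (arr.length : Int)
instance (arr : List Int) (n : Int) (k : Int) : Decidable (Pre_brute arr n k) := by
  unfold Pre_brute; infer_instance

def pvWitness_brute : List Int × Int × Int := ([1, 4, 9], 3, 2)

def Spec_brute (arr : List Int) (n : Int) (k : Int) (out : Int) : Prop := out = brute_alt arr n k
instance (arr : List Int) (n : Int) (k : Int) (out : Int) : Decidable (Spec_brute arr n k out) := by
  unfold Spec_brute; infer_instance

-- ===== CLAIM (what is proved, stated in full; the proofs are below) =====
def Claim_equal_brute : Prop := ∀ (arr : List Int) (n : Int) (k : Int), Dom_brute arr n k → Pre_brute arr n k → Spec_brute arr n k (brute arr n k)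

-- ===== LEMMAS AND PROOFS =====

-- proof-only tail-list version of helper's early-exit index loop
def pvEarly (d k : Int) : List Int → Int → Int → Bool
  | [], _, _ => false
  | x :: xs, cnt, last =>
    let cnt' := if x - last ≥ d then cnt + 1 else cnt
    let last' := if x - last ≥ d then x else last
    if cnt' ≥ k then true else pvEarly d k xs cnt' last'

lemma pv_foldl_min (a0 : Int) (t : List Int) (h : ∀ y ∈ t, a0 ≤ y) : t.foldl min a0 = a0 := by
  induction t with
  | nil => rfl
  | cons y t ih =>
    have hy : a0 ≤ y := h y (List.mem_cons_self ..)
    simp only [List.foldl_cons, min_eq_left hy]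
    exact ih (fun z hz => h z (List.mem_cons_of_mem _ hz))

lemma pv_foldl_max (x : Int) (t : List Int) (h : (x :: t).Pairwise (· ≤ ·)) :
    t.foldl max x = (x :: t).getLast (by simp) := by
  induction t generalizing x with
  | nil => rfl
  | cons y t ih =>
    rw [List.pairwise_cons] at h
    have hxy : x ≤ y := h.1 y (List.mem_cons_self ..)
    simp only [List.foldl_cons, max_eq_right hxy]
    rw [List.getLast_cons (by simp)]
    exact ih y h.2

lemma pv_helperLoop_drop (s : List Int) (d k : Int) :
    ∀ (fuel j : Nat) (cnt last : Int), s.length - j ≤ fuel →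
      pvHelperLoop s d k (PySem.List.pyRange (j : Int) (s.length : Int) 1) cnt last
        = pvEarly d k (s.drop j) cnt last := by
  intro fuel
  induction fuel with
  | zero =>
    intro j cnt last hf
    have hj : s.length ≤ j := by omega
    rw [PySem.List.pyRange_one_eq_nil (by exact_mod_cast hj), List.drop_of_length_le hj]
    rfl
  | succ f ih =>
    intro j cnt last hf
    by_cases hj : j < s.length
    · rw [PySem.List.pyRange_one_cons (by exact_mod_cast hj)]
      rw [List.drop_eq_getElem_cons hj]
      have hget : PySem.List.pyGetD s (j : Int) 0 = s[j] := by
        rw [PySem.List.pyGetD_natCast, List.getD_eq_getElem?_getD, List.getElem?_eq_getElem hj]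
        rfl
      simp only [pvHelperLoop, pvEarly, hget]
      rw [show ((j : Int) + 1) = ((j + 1 : Nat) : Int) by push_cast; ring]
      split <;> split <;> first
        | rfl
        | exact ih (j + 1) _ _ (by omega)
    · have hj' : s.length ≤ j := by omega
      rw [PySem.List.pyRange_one_eq_nil (by exact_mod_cast hj'), List.drop_of_length_le hj']
      rfl

lemma pv_canLoop_ge (d : Int) :
    ∀ (xs : List Int) (cnt last : Int), cnt ≤ (pvCanLoop d xs cnt last).1 := by
  intro xs
  induction xs with
  | nil => intro cnt last; simp [pvCanLoop]
  | cons x xs ih =>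
    intro cnt last
    simp only [pvCanLoop]
    split
    · exact le_trans (by omega) (ih (cnt + 1) x)
    · exact ih cnt last

lemma pv_early_iff (d k : Int) :
    ∀ (xs : List Int) (cnt last : Int), xs ≠ [] →
      (pvEarly d k xs cnt last = true ↔ (pvCanLoop d xs cnt last).1 ≥ k) := by
  intro xs
  induction xs with
  | nil => intro _ _ h; exact absurd rfl h
  | cons x xs ih =>
    intro cnt last _
    simp only [pvEarly, pvCanLoop]
    by_cases hx : x - last ≥ d <;> simp only [hx, if_pos, if_false]
    · by_cases hk : cnt + 1 ≥ k
      · simp only [if_pos hk, true_iff]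
        exact le_trans hk (pv_canLoop_ge d xs (cnt + 1) x)
      · rw [if_neg hk]
        cases xs with
        | nil => simp [pvEarly, pvCanLoop]; omega
        | cons y ys => exact ih (cnt + 1) x (by simp)
    · by_cases hk : cnt ≥ k
      · simp only [if_pos hk, true_iff]
        exact le_trans hk (pv_canLoop_ge d xs cnt last)
      · rw [if_neg hk]
        cases xs with
        | nil => simp [pvEarly, pvCanLoop]; omega
        | cons y ys => exact ih cnt last (by simp)

lemma pv_canLoop_mono (d d' : Int) (hd : d ≤ d') :
    ∀ (xs : List Int) (cnt cnt' last last' : Int),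
      xs.Pairwise (· ≤ ·) → (∀ x ∈ xs, last ≤ x) → (∀ x ∈ xs, last' ≤ x) →
      cnt' ≤ cnt → (cnt' = cnt → last ≤ last') →
      (pvCanLoop d' xs cnt' last').1 ≤ (pvCanLoop d xs cnt last).1 ∧
        ((pvCanLoop d' xs cnt' last').1 = (pvCanLoop d xs cnt last).1 →
          (pvCanLoop d xs cnt last).2 ≤ (pvCanLoop d' xs cnt' last').2) := by
  intro xs
  induction xs with
  | nil =>
    intro cnt cnt' last last' _ _ _ hcc hlast
    exact ⟨hcc, hlast⟩
  | cons x xs ih =>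
    intro cnt cnt' last last' hp hl hl' hcc hlast
    rw [List.pairwise_cons] at hp
    have hlx : last ≤ x := hl x (List.mem_cons_self ..)
    have hl'x : last' ≤ x := hl' x (List.mem_cons_self ..)
    have hlt : ∀ y ∈ xs, last ≤ y := fun y hy => hl y (List.mem_cons_of_mem _ hy)
    have hl't : ∀ y ∈ xs, last' ≤ y := fun y hy => hl' y (List.mem_cons_of_mem _ hy)
    simp only [pvCanLoop]
    by_cases h1 : x - last ≥ d <;> by_cases h2 : x - last' ≥ d' <;>
      simp only [h1, h2, if_pos, if_false]
    · exact ih (cnt + 1) (cnt' + 1) x x hp.2 hp.1 hp.1 (by omega) (fun _ => le_refl x)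
    · exact ih (cnt + 1) cnt' x last' hp.2 hp.1 hl't (by omega) (fun he => absurd he (by omega))
    · have hll : last' < last := by omega
      have hne : cnt' < cnt := by
        rcases lt_or_eq_of_le hcc with h | h
        · exact h
        · exact absurd (hlast h) (by omega)
      exact ih cnt (cnt' + 1) last x hp.2 hlt hp.1 (by omega) (fun _ => hlx)
    · exact ih cnt cnt' last last' hp.2 hlt hl't hcc hlast

lemma pv_can_mono (s : List Int) (a0 : Int) (rest : List Int) (hs : s = a0 :: rest)
    (hp : s.Pairwise (· ≤ ·)) (k d d' : Int) (hdd : d ≤ d') :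
    pvCan s d' k = true → pvCan s d k = true := by
  subst hs
  rw [List.pairwise_cons] at hp
  unfold pvCan
  rw [PySem.List.slice_from_one, List.tail_cons, PySem.List.pyGetD_zero_cons]
  simp only [decide_eq_true_eq]
  intro h
  have := pv_canLoop_mono d d' hdd rest 1 1 a0 a0 hp.2 hp.1 hp.1 le_rfl (fun _ => le_rfl)
  omega

lemma pv_bsearch_spec (s : List Int) (k : Int)
    (hmono : ∀ d d', d ≤ d' → pvCan s d' k = true → pvCan s d k = true) :
    ∀ (fuel : Nat) (lo hi : Int), (hi - lo).toNat ≤ fuel → lo ≤ hi →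
      lo ≤ pvBsearch s k lo hi ∧ pvBsearch s k lo hi ≤ hi ∧
        (pvBsearch s k lo hi = hi ∨ pvCan s (pvBsearch s k lo hi) k = false) ∧
        (∀ i, lo ≤ i → i < pvBsearch s k lo hi → pvCan s i k = true) := by
  intro fuel
  induction fuel with
  | zero =>
    intro lo hi hf hlh
    have heq : hi = lo := by omega
    rw [pvBsearch, dif_neg (by omega : ¬ lo < hi)]
    exact ⟨le_rfl, by omega, Or.inl heq.symm, fun i h1 h2 => absurd h2 (by omega)⟩
  | succ f ih =>
    intro lo hi hf hlh
    by_cases hlt : lo < hi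
    · have hb := PySem.Int.floordiv_two_mid_bounds (le_of_lt hlt)
      have hb2 : PySem.Int.floordiv (lo + hi) 2 < hi := by
        rw [PySem.Int.floordiv_lt_iff_lt_mul (by norm_num)]; omega
      set mid := PySem.Int.floordiv (lo + hi) 2 with hmid
      have hunf : pvBsearch s k lo hi =
          if pvCan s mid k then pvBsearch s k (mid + 1) hi else pvBsearch s k lo mid := by
        rw [pvBsearch, dif_pos hlt]
      by_cases hc : pvCan s mid k = true
      · rw [hunf, if_pos hc]
        obtain ⟨i1, i2, i3, i4⟩ := ih (mid + 1) hi (by omega) (by omega)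
        refine ⟨by omega, i2, i3, fun i h1 h2 => ?_⟩
        by_cases hi' : i ≤ mid
        · exact hmono i mid hi' hc
        · exact i4 i (by omega) h2
      · rw [hunf, if_neg hc]
        obtain ⟨i1, i2, i3, i4⟩ := ih lo mid (by omega) (by omega)
        refine ⟨i1, by omega, ?_, i4⟩
        rcases i3 with h | h
        · exact Or.inr (by rw [h]; exact Bool.eq_false_iff.mpr hc)
        · exact Or.inr h
    · have heq : hi = lo := by omega
      rw [pvBsearch, dif_neg hlt]
      exact ⟨le_rfl, by omega, Or.inl heq.symm, fun i h1 h2 => absurd h2 (by omega)⟩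

lemma pv_bruteLoop_eq (s : List Int) (k limit R r : Int)
    (hhc : ∀ i, 1 ≤ i → i < R → pvHelper s i k = pvCan s i k)
    (hr1 : 1 ≤ r) (hrR : r ≤ R)
    (hend : r = R ∨ pvCan s r k = false)
    (hbelow : ∀ i, 1 ≤ i → i < r → pvCan s i k = true) :
    ∀ (fuel : Nat) (lo : Int), (R - lo).toNat ≤ fuel → 1 ≤ lo → lo ≤ r →
      pvBruteLoop s k limit lo R = if r = R then limit else r - 1 := by
  intro fuel
  induction fuel with
  | zero =>
    intro lo hf h1 h2
    have hrR' : r = R := by omega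
    rw [pvBruteLoop, dif_neg (by omega : ¬ lo < R), if_pos hrR']
  | succ f ih =>
    intro lo hf h1 h2
    by_cases hloR : lo < R
    · rw [pvBruteLoop, dif_pos hloR]
      rw [hhc lo h1 hloR]
      by_cases hlr : lo < r
      · rw [if_neg (by simp [hbelow lo h1 hlr])]
        exact ih (lo + 1) (by omega) (by omega) (by omega)
      · have hlor : lo = r := by omega
        have hcr : pvCan s r k = false := by
          rcases hend with h | h
          · omega
          · exact h
        rw [hlor, if_pos (by simp [hcr]), if_neg (by omega)]
    · have hrR' : r = R := by omega
      rw [pvBruteLoop, dif_neg hloR, if_pos hrR']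

lemma pv_main (arr : List Int) (n k : Int) : brute arr n k = brute_alt arr n k := by
  simp only [brute, brute_alt]
  set s := PySem.List.sorted arr (fun x => x) false with hsdef
  cases hsc : s with
  | nil =>
    have hg : ∀ i : Int, PySem.List.pyGetD ([] : List Int) i 0 = 0 := by
      intro i; simp [PySem.List.pyGetD, PySem.List.pyGet?, PySem.List.pyIdx?]
    rw [pvBsearch, pvBruteLoop]
    norm_num [hg, PySem.List.max?, PySem.List.min?]
  | cons a0 rest =>
    have hpair : (a0 :: rest).Pairwise (· ≤ ·) := by
      rw [← hsc, hsdef]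
      exact PySem.List.sorted_pairwise arr (fun x => x)
    rw [List.pairwise_cons] at hpair
    have hmaxA : (PySem.List.max? (a0 :: rest) fun x => x).getD 0 = (a0 :: rest).getLast (by simp) := by
      rw [PySem.List.max?_id_cons, Option.getD_some]
      exact pv_foldl_max a0 rest (List.pairwise_cons.mpr hpair)
    have hmaxB : PySem.List.pyGetD (a0 :: rest) (-1) 0 = (a0 :: rest).getLast (by simp) :=
      PySem.List.pyGetD_neg_one (a0 :: rest) 0 (by simp)
    have hminA : (PySem.List.min? (a0 :: rest) fun x => x).getD 0 = a0 := by
      rw [PySem.List.min?_id_cons, Option.getD_some]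
      exact pv_foldl_min a0 rest hpair.1
    have hminB : PySem.List.pyGetD (a0 :: rest) 0 0 = a0 := PySem.List.pyGetD_zero_cons ..
    rw [hmaxA, hmaxB, hminA, hminB]
    set M := (a0 :: rest).getLast (by simp) with hMdef
    set R := M - a0 with hRdef
    set L := PySem.List.pyGetD (a0 :: rest) (n - 1) 0 - a0 with hLdef
    by_cases hR2 : R < 2
    · rw [pvBruteLoop, dif_neg (by omega : ¬ (1:Int) < R), pvBsearch,
        dif_neg (by omega : ¬ (1:Int) < R), if_pos (by omega : (1:Int) ≥ R)]
    · have hrest : rest ≠ [] := by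
        intro h
        subst h
        have : M = a0 := by simp [hMdef]
        omega
      have hhc : ∀ d, pvHelper (a0 :: rest) d k = pvCan (a0 :: rest) d k := by
        intro d
        have h1 : pvHelper (a0 :: rest) d k = pvEarly d k rest 1 a0 := by
          unfold pvHelper
          have hd := pv_helperLoop_drop (a0 :: rest) d k (a0 :: rest).length 1 1
            (PySem.List.pyGetD (a0 :: rest) 0 0) (by omega)
          rw [show (((1 : Nat) : Int)) = 1 from by norm_num] at hd
          rw [hd, List.drop_one, List.tail_cons, PySem.List.pyGetD_zero_cons]
        have h2 : pvCan (a0 :: rest) d k = decide ((pvCanLoop d rest 1 a0).1 ≥ k) := by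
          unfold pvCan
          rw [PySem.List.slice_from_one, List.tail_cons, PySem.List.pyGetD_zero_cons]
        rw [h1, h2]
        have hiff := pv_early_iff d k rest 1 a0 hrest
        by_cases hb : (pvCanLoop d rest 1 a0).1 ≥ k <;> simp [hb] at hiff ⊢ <;> exact hiff
      have hmono : ∀ d d', d ≤ d' → pvCan (a0 :: rest) d' k = true → pvCan (a0 :: rest) d k = true :=
        fun d d' h => pv_can_mono (a0 :: rest) a0 rest rfl (List.pairwise_cons.mpr hpair) k d d' h
      obtain ⟨hb1, hb2, hb3, hb4⟩ :=
        pv_bsearch_spec (a0 :: rest) k hmono (R - 1).toNat 1 R (by omega) (by omega)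
      rw [pv_bruteLoop_eq (a0 :: rest) k L R (pvBsearch (a0 :: rest) k 1 R)
        (fun i _ _ => hhc i) hb1 hb2 hb3 hb4 (R - 1).toNat 1 (by omega) le_rfl hb1]
      exact if_congr (by omega) rfl rfl

-- ===== VERDICT (by name: the statement is the Claim_ definition above) =====
theorem brute_spec : Claim_equal_brute := by
  intro arr n k _ _
  unfold Spec_brute
  exact pv_main arr n k
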